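-- pv_equiv track=rewrite | github.com/a0960211197/ROItemSearchApp | skill_tree.py | split_job_chain_to_groups
-- ===== SOURCE A (Python) =====
-- def split_job_chain_to_groups(job_chain: list[str]) -> list[list[str]]:
--     """
--     例如:
--     ['Swordman', 'Knight', 'Knight_H', 'Rune_Knight', 'Dragon_Knight']
--     -> [
--          ['Swordman'],
--          ['Knight', 'Knight_H'],
--          ['Rune_Knight'],
--          ['Dragon_Knight'],
--        ]
--     """
--     groups: list[list[str]] = []
--     i = 0
--     while i < len(job_chain):
--         cur = job_chain[i]
--         if i + 1 < len(job_chain):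
--             nxt = job_chain[i + 1]
--             if nxt.endswith("_H") and nxt[:-2] == cur:
--                 groups.append([cur, nxt])
--                 i += 2
--                 continue
--         groups.append([cur])
--         i += 1
--     return groups
-- ===== SOURCE B (Python) =====
-- def split_job_chain_to_groups(job_chain: list[str]) -> list[list[str]]:
--     groups: list[list[str]] = []
--     for job in job_chain:
--         if groups and job.endswith("_H") and len(groups[-1]) == 1 and groups[-1][0] == job[:-2]:
--             groups[-1].append(job)
--         else:
--             groups.append([job])
--     return groups
-- ===== Notes on version B (the rewrite author's own statement) =====
-- stated objective: simpler
-- what changed: Replaces the index-based while loop with lookahead (peek at job_chain[i+1], advance i by 2 on a merge) by a single for-loop that looks behind: each job is merged into the last group iff it ends with '_H' and that group is a singleton holding its base name.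
import Mathlib
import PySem

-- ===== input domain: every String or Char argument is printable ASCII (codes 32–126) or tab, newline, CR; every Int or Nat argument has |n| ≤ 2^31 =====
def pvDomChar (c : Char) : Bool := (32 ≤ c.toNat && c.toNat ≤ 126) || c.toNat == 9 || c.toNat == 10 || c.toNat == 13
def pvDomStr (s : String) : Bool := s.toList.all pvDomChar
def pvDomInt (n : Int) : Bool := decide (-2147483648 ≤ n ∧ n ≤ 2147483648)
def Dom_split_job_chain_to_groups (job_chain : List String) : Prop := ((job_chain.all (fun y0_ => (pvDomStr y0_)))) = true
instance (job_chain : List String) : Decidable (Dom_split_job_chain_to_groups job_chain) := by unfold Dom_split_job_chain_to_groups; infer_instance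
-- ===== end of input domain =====

-- B replaces A's index-based while loop with lookahead by a single look-behind
-- for-loop (merge a '_H' job into the previous singleton group); objective: simpler.

-- ===== PORT A =====
-- A's while loop over index i (lookahead at job_chain[i+1]; i += 2 on a merge,
-- i += 1 otherwise) transliterated as the obvious recursion on the remaining
-- suffix of the list; nxt[:-2] is PySem.Str.slice nxt none (some (-2)).
def split_job_chain_to_groups (job_chain : List String) : List (List String) :=
  match job_chain with
  | [] => []
  | [cur] => [[cur]]
  | cur :: nxt :: rest =>
      if PySem.Str.endswith nxt "_H" = true ∧ PySem.Str.slice nxt none (some (-2)) = cur then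
        [cur, nxt] :: split_job_chain_to_groups rest
      else
        [cur] :: split_job_chain_to_groups (nxt :: rest)

-- ===== PORT B =====
-- one step of B's for-loop: merge job into the last group iff that group is a
-- singleton [base] with job.endswith('_H') and job[:-2] == base
def pvAltStep (groups : List (List String)) (job : String) : List (List String) :=
  match groups.getLast? with
  | some [base] =>
      if PySem.Str.endswith job "_H" = true ∧ PySem.Str.slice job none (some (-2)) = base then
        groups.dropLast ++ [[base, job]]
      else
        groups ++ [[job]]
  | _ => groups ++ [[job]]

def split_job_chain_to_groups_alt (job_chain : List String) : List (List String) :=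
  job_chain.foldl pvAltStep []

-- ===== PRECONDITION & SPEC =====
def Spec_split_job_chain_to_groups (job_chain : List String) (out : List (List String)) : Prop := out = split_job_chain_to_groups_alt job_chain
instance (job_chain : List String) (out : List (List String)) : Decidable (Spec_split_job_chain_to_groups job_chain out) := by unfold Spec_split_job_chain_to_groups; infer_instance

-- ===== CLAIM (what is proved, stated in full; the proofs are below) =====
def Claim_equal_split_job_chain_to_groups : Prop := ∀ (job_chain : List String), Dom_split_job_chain_to_groups job_chain → Spec_split_job_chain_to_groups job_chain (split_job_chain_to_groups job_chain)

-- ===== LEMMAS AND PROOFS =====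

lemma pvAltStep_ne_nil (g : List (List String)) (j : String) : pvAltStep g j ≠ [] := by
  unfold pvAltStep
  rcases h : g.getLast? with _ | ⟨_ | ⟨b, _ | _⟩⟩
  · simp
  · simp
  · simp only []; split <;> simp
  · simp

-- the step only inspects / rewrites the last group of the accumulator
lemma pvAltStep_append (g h : List (List String)) (hh : h ≠ []) (j : String) :
    pvAltStep (g ++ h) j = g ++ pvAltStep h j := by
  rcases List.eq_nil_or_concat h with rfl | ⟨h', a, rfl⟩
  · exact absurd rfl hh
  · simp only [List.concat_eq_append]
    unfold pvAltStep
    rw [← List.append_assoc, List.getLast?_concat, List.getLast?_concat]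
    rcases a with _ | ⟨b, _ | ⟨b2, t⟩⟩
    · simp
    · simp only []
      split <;> simp
    · simp

-- frame rule: a nonempty suffix of the accumulator can be split off the fold
lemma pvFoldl_frame (xs : List String) (g h : List (List String)) (hh : h ≠ []) :
    xs.foldl pvAltStep (g ++ h) = g ++ xs.foldl pvAltStep h := by
  induction xs generalizing h with
  | nil => simp
  | cons x xs ih =>
      simp only [List.foldl_cons, pvAltStep_append g h hh x]
      exact ih _ (pvAltStep_ne_nil h x)

-- after a merged pair the last group is a pair, so every later job starts fresh
lemma pvFoldl_pair (xs : List String) (c n : String) :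
    xs.foldl pvAltStep [[c, n]] = [c, n] :: xs.foldl pvAltStep [] := by
  cases xs with
  | nil => rfl
  | cons x xs =>
      have h1 : pvAltStep [[c, n]] x = [[c, n]] ++ [[x]] := rfl
      have h2 : pvAltStep ([] : List (List String)) x = [[x]] := rfl
      simp only [List.foldl_cons, h1, h2]
      exact pvFoldl_frame xs [[c, n]] [[x]] (by simp)

lemma pv_main (job_chain : List String) :
    split_job_chain_to_groups job_chain = split_job_chain_to_groups_alt job_chain := by
  unfold split_job_chain_to_groups_alt
  induction job_chain using split_job_chain_to_groups.induct with
  | case1 => rfl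
  | case2 c => rfl
  | case3 c n rest hcond ih =>
      have hstep : pvAltStep [[c]] n = [[c, n]] := by
        have h : pvAltStep [[c]] n =
            if PySem.Str.endswith n "_H" = true ∧ PySem.Str.slice n none (some (-2)) = c then
              [[c, n]] else [[c]] ++ [[n]] := rfl
        rw [h, if_pos hcond]
      rw [split_job_chain_to_groups, if_pos hcond, ih]
      simp only [List.foldl_cons]
      have h0 : pvAltStep ([] : List (List String)) c = [[c]] := rfl
      rw [h0, hstep, pvFoldl_pair]
  | case4 c n rest hcond ih =>
      have hstep : pvAltStep [[c]] n = [[c]] ++ [[n]] := by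
        have h : pvAltStep [[c]] n =
            if PySem.Str.endswith n "_H" = true ∧ PySem.Str.slice n none (some (-2)) = c then
              [[c, n]] else [[c]] ++ [[n]] := rfl
        rw [h, if_neg hcond]
      rw [split_job_chain_to_groups, if_neg hcond, ih]
      simp only [List.foldl_cons]
      have h0 : pvAltStep ([] : List (List String)) c = [[c]] := rfl
      have h0' : pvAltStep ([] : List (List String)) n = [[n]] := rfl
      rw [h0, h0', hstep, pvFoldl_frame rest [[c]] [[n]] (by simp)]
      rfl

-- ===== VERDICT (by name: the statement is the Claim_ definition above) =====
theorem split_job_chain_to_groups_spec : Claim_equal_split_job_chain_to_groups := by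
  intro job_chain _
  unfold Spec_split_job_chain_to_groups
  exact pv_main job_chain
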